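-- pv_equiv track=rewrite | github.com/droogadulce/HackerRank | math/best_divisor.py | bestDivisor
-- ===== SOURCE A (Python) =====
-- def getDivisors(n):
--     arr = []
--     for i in range(1, n+1):
--         # Get all divisors
--         if (n%i == 0):
--             arr.append(i)
--     return arr
--
-- def sumDigits(n):
--     numberStr = str(n)
--     result = 0
--     for s in numberStr:
--         result += int(s)
--     return result
--
-- def bestDivisor(n):
--     divisors = getDivisors(n)
--     bestDivisor = 1
--     for i in divisors:
--         newNumber = sumDigits(i)
--         if newNumber == bestDivisor:
--             mins = [i, bestDivisor]
--             bestDivisor = min(mins)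
--         elif newNumber > sumDigits(bestDivisor):
--             bestDivisor = i
--     return bestDivisor
-- ===== SOURCE B (Python) =====
-- def bestDivisor(n):
--     # Collect divisors in O(sqrt(n)) pairs, then sort ascending and apply the
--     # same selection rule as the original.
--     cands = set()
--     i = 1
--     while i * i <= n:
--         if n % i == 0:
--             cands.add(i)
--             cands.add(n // i)
--         i += 1
--     best = 1
--     for d in sorted(cands):
--         s = sum(map(int, str(d)))
--         if s == best:
--             best = min(d, best)
--         elif s > sum(map(int, str(best))):
--             best = d
--     return best
-- ===== Notes on version B (the rewrite author's own statement) =====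
-- stated objective: faster
-- what changed: B enumerates divisors in O(sqrt(n)) as pairs (i, n//i) collected into a set and sorted ascending, instead of A's full 1..n trial-division scan, then applies the same selection loop.
import Mathlib
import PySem

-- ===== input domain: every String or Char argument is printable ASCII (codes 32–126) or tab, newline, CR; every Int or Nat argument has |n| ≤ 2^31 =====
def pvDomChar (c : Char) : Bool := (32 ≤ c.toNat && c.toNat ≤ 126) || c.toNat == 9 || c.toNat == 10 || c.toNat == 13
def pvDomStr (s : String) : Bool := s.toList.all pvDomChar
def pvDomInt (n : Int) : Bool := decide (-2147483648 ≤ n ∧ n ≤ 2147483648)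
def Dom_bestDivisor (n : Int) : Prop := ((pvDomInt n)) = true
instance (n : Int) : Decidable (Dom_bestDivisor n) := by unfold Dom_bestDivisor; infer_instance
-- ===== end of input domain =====

-- B replaces A's full 1..n divisor scan by an O(√n) pair enumeration (i, n//i)
-- collected into a set and sorted; the selection loop is unchanged (objective: faster).

-- ===== PORT A =====
def sumDigitsA (n : Int) : Int :=
  (PySem.Int.toChars n).foldl (fun result s => result + (PySem.Int.ofChars? [s]).getD 0) 0

def bestDivisor (n : Int) : Int :=
  let divisors := (PySem.List.pyRange 1 (n + 1) 1).foldl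
    (fun arr i => if PySem.Int.mod n i == 0 then arr ++ [i] else arr) []
  divisors.foldl (fun best i =>
    let newNumber := sumDigitsA i
    if newNumber == best then min i best
    else if newNumber > sumDigitsA best then i else best) 1

-- ===== PORT B =====
def digitSumB (d : Int) : Int :=
  ((PySem.Int.toChars d).map (fun c => (PySem.Int.ofChars? [c]).getD 0)).sum

def collectB (n i : Int) (cands : PySem.Set Int) : PySem.Set Int :=
  if _h : i * i ≤ n then
    collectB n (i + 1)
      (if PySem.Int.mod n i = 0 then
        PySem.Set.add (PySem.Set.add cands i) (PySem.Int.floordiv n i)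
      else cands)
  else cands
termination_by (n + 1 - i).toNat
decreasing_by
  have hin : i ≤ n := by
    by_cases h0 : i ≤ 0
    · exact le_trans (le_trans h0 (mul_self_nonneg i)) _h
    · exact le_trans (le_mul_of_one_le_left (by omega) (by omega)) _h
  omega

def bestDivisor_alt (n : Int) : Int :=
  let cands := collectB n 1 PySem.Set.empty
  (PySem.List.sorted cands (fun x => x) false).foldl (fun best d =>
    let s := digitSumB d
    if s == best then min d best
    else if s > digitSumB best then d else best) 1

-- ===== PRECONDITION & SPEC =====
def Spec_bestDivisor (n : Int) (out : Int) : Prop := out = bestDivisor_alt n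
instance (n : Int) (out : Int) : Decidable (Spec_bestDivisor n out) := by unfold Spec_bestDivisor; infer_instance

-- ===== CLAIM (what is proved, stated in full; the proofs are below) =====
def Claim_equal_bestDivisor : Prop := ∀ (n : Int), Dom_bestDivisor n → Spec_bestDivisor n (bestDivisor n)

-- ===== LEMMAS AND PROOFS =====

theorem mem_collectB (n : Int) (i : Int) (s : PySem.Set Int) (x : Int) :
    1 ≤ i → (x ∈ collectB n i s ↔ x ∈ s ∨ ∃ j, i ≤ j ∧ j * j ≤ n ∧ PySem.Int.mod n j = 0 ∧
      (x = j ∨ x = PySem.Int.floordiv n j)) := by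
  fun_induction collectB n i s with
  | case1 i s _h ih =>
    intro hi
    simp only [dite_eq_ite] at ih
    rw [ih (by omega)]
    constructor
    · rintro (hm | ⟨j, hj1, hj2, hj3, hj4⟩)
      · split_ifs at hm with hmod
        · rcases (PySem.Set.mem_add _ _ _).1 hm with hm' | hm'
          · rcases (PySem.Set.mem_add _ _ _).1 hm' with hm'' | hm''
            · exact Or.inl hm''
            · exact Or.inr ⟨i, le_refl i, _h, hmod, Or.inl hm''⟩
          · exact Or.inr ⟨i, le_refl i, _h, hmod, Or.inr hm'⟩
        · exact Or.inl hm
      · exact Or.inr ⟨j, by omega, hj2, hj3, hj4⟩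
    · rintro (hm | ⟨j, hj1, hj2, hj3, hj4⟩)
      · refine Or.inl ?_
        split_ifs with hmod
        · exact (PySem.Set.mem_add _ _ _).2 (Or.inl ((PySem.Set.mem_add _ _ _).2 (Or.inl hm)))
        · exact hm
      · by_cases hji : j = i
        · subst hji
          refine Or.inl ?_
          rw [if_pos hj3]
          rcases hj4 with h4 | h4
          · exact (PySem.Set.mem_add _ _ _).2 (Or.inl ((PySem.Set.mem_add _ _ _).2 (Or.inr h4)))
          · exact (PySem.Set.mem_add _ _ _).2 (Or.inr h4)
        · exact Or.inr ⟨j, by omega, hj2, hj3, hj4⟩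
  | case2 i s hno =>
    intro hi
    simp only [iff_self_or]
    rintro ⟨j, hj1, hj2, _, _⟩
    exact absurd (le_trans (mul_le_mul hj1 hj1 (by omega) (by omega)) hj2) hno

theorem nodup_collectB (n : Int) (i : Int) (s : PySem.Set Int) (h : s.Nodup) :
    (collectB n i s).Nodup := by
  fun_induction collectB n i s with
  | case1 i s _h ih =>
    refine ih ?_
    split_ifs with hmod
    · exact PySem.Set.nodup_add _ _ (PySem.Set.nodup_add _ _ h)
    · exact h
  | case2 i s hno => exact h

-- membership in B's candidate set = "x is a divisor of n with 1 ≤ x ≤ n"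
theorem mem_collect_iff (n x : Int) :
    x ∈ collectB n 1 PySem.Set.empty ↔ 1 ≤ x ∧ x < n + 1 ∧ PySem.Int.mod n x = 0 := by
  rw [mem_collectB n 1 PySem.Set.empty x (le_refl 1)]
  simp only [PySem.Set.empty, List.not_mem_nil, false_or]
  constructor
  · rintro ⟨j, hj1, hj2, hj3, hj4⟩
    have hjdvd : j ∣ n := (PySem.Int.mod_eq_zero_iff_dvd n j).1 hj3
    have hjn : j ≤ n := le_trans (le_mul_of_one_le_left (by omega) hj1) hj2
    rcases hj4 with rfl | rfl
    · exact ⟨hj1, by omega, hj3⟩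
    · rw [PySem.Int.floordiv_eq_ediv_of_pos (by omega)]
      have h1 : 1 ≤ n / j := (Int.le_ediv_iff_mul_le (by omega)).2 (by omega)
      have h2 : n / j ≤ n := Int.ediv_le_self j (by omega)
      exact ⟨h1, by omega, (PySem.Int.mod_eq_zero_iff_dvd n (n / j)).2 (Int.ediv_dvd_of_dvd hjdvd)⟩
  · rintro ⟨hx1, hx2, hx3⟩
    have hdvd : x ∣ n := (PySem.Int.mod_eq_zero_iff_dvd n x).1 hx3
    have hq : x * (n / x) = n := Int.mul_ediv_cancel' hdvd
    have hq1 : 1 ≤ n / x := (Int.le_ediv_iff_mul_le (by omega)).2 (by omega)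
    by_cases hxx : x * x ≤ n
    · exact ⟨x, hx1, hxx, hx3, Or.inl rfl⟩
    · refine ⟨n / x, hq1, by nlinarith, ?_, Or.inr ?_⟩
      · exact (PySem.Int.mod_eq_zero_iff_dvd n (n / x)).2 (Int.ediv_dvd_of_dvd hdvd)
      · rw [PySem.Int.floordiv_eq_ediv_of_pos (by omega)]
        exact (Int.ediv_eq_of_eq_mul_left (by omega) (by linarith [hq])).symm

theorem sorted_collect_eq (n : Int) :
    PySem.List.sorted (collectB n 1 PySem.Set.empty) (fun x => x) false
      = (PySem.List.pyRange 1 (n + 1) 1).filter (fun i => PySem.Int.mod n i == 0) := by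
  refine PySem.List.sorted_eq_of_perm_of_pairwise_lt _ _ (fun x : Int => x) ?_ ?_
  · refine (List.perm_ext_iff_of_nodup ?_ ?_).2 ?_
    · exact (PySem.List.nodup_pyRange_one 1 (n + 1)).filter _
    · exact nodup_collectB n 1 PySem.Set.empty List.nodup_nil
    · intro x
      rw [List.mem_filter, PySem.List.mem_pyRange_one, mem_collect_iff]
      simp [and_assoc]
  · exact (PySem.List.pairwise_lt_pyRange_one 1 (n + 1)).filter (fun i => PySem.Int.mod n i == 0)

theorem digitSum_eq (d : Int) : sumDigitsA d = digitSumB d := by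
  unfold sumDigitsA digitSumB
  rw [PySem.List.foldl_add]
  simp

-- ===== VERDICT (by name: the statement is the Claim_ definition above) =====
theorem bestDivisor_spec : Claim_equal_bestDivisor := by
  intro n _
  show bestDivisor n = bestDivisor_alt n
  unfold bestDivisor bestDivisor_alt
  simp only [PySem.List.foldl_append_if_eq_filter, sorted_collect_eq, digitSum_eq,
    List.nil_append]
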